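-- pv_equiv track=rewrite | github.com/CoDen256/os | flow-launcher/dev/Plugins/DWDS-Flow-2.1.0/main.py | soft_break_after
-- ===== SOURCE A (Python) =====
-- def soft_break_after(text, max):
--     result = ""
--     indented = False
--     for word in text.split(" "):
--         if not indented and len(result) + len(word) > max:
--             result += "\n" + word
--             indented = True
--         else:
--             result += " " + word
--     return result
-- ===== SOURCE B (Python) =====
-- def soft_break_after(text, max):
--     words = text.split(" ")
--     run = 0
--     i = 0
--     for w in words:
--         if run + len(w) > max:
--             break
--         run += 1 + len(w)
--         i += 1
--     head = "".join(" " + w for w in words[:i])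
--     rest = words[i:]
--     if not rest:
--         return head
--     return head + "\n" + rest[0] + "".join(" " + w for w in rest[1:])
-- ===== Notes on version B (the rewrite author's own statement) =====
-- stated objective: alternative
-- what changed: Replaces the single loop that interleaves a growing result string with a stateful 'indented' flag by a two-phase algorithm: first a counting scan finds the break index from running lengths, then the result is assembled from three slices (space-joined head, newline word, space-joined tail) with str.join.
import Mathlib
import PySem

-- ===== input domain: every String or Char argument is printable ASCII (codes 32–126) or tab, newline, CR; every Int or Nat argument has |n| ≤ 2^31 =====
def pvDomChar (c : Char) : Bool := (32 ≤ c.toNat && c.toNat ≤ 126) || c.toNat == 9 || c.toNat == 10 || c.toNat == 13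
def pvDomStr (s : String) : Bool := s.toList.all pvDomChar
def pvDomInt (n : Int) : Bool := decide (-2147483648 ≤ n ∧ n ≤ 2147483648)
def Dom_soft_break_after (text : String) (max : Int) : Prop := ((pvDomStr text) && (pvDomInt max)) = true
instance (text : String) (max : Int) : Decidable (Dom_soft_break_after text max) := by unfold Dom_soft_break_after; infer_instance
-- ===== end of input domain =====

-- B replaces A's single loop (growing result + 'indented' flag) by a two-phase
-- algorithm: a counting scan finds the break index, then the result is assembled
-- from three slices with join.  Objective: alternative decomposition, same cost.

-- ===== PORT A =====
-- the loop body of A: state (result, indented)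
def sbaStep (max : Int) (st : String × Bool) (word : String) : String × Bool :=
  if st.2 = false ∧ (st.1.length : Int) + (word.length : Int) > max then
    (st.1 ++ ("\n" ++ word), true)
  else
    (st.1 ++ (" " ++ word), st.2)

def soft_break_after (text : String) (max : Int) : String :=
  match PySem.Str.split? text " " with
  | none => ""   -- unreachable: the separator " " is nonempty, so split? never returns none
  | some words => (words.foldl (sbaStep max) ("", false)).1

-- ===== PORT B =====
-- the for-loop of Source B that finds the break position: number of words consumed
-- before the first word whose addition would exceed max (run is the running length)
def sbaPrefixLen (max : Int) : List String → Int → Nat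
  | [], _ => 0
  | w :: ws, run =>
      if run + (w.length : Int) > max then 0
      else sbaPrefixLen max ws (run + 1 + (w.length : Int)) + 1

-- "".join(" " + w for w in ws)
def sbaJoinSp (ws : List String) : String :=
  PySem.Str.join "" (ws.map (fun w => " " ++ w))

def soft_break_after_alt (text : String) (max : Int) : String :=
  match PySem.Str.split? text " " with
  | none => ""   -- unreachable: the separator " " is nonempty, so split? never returns none
  | some words =>
      let i := sbaPrefixLen max words 0
      let head := sbaJoinSp (List.take i words)
      match List.drop i words with
      | [] => head
      | w :: rest => head ++ "\n" ++ w ++ sbaJoinSp rest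

-- ===== PRECONDITION & SPEC =====
def Spec_soft_break_after (text : String) (max : Int) (out : String) : Prop := out = soft_break_after_alt text max
instance (text : String) (max : Int) (out : String) : Decidable (Spec_soft_break_after text max out) := by unfold Spec_soft_break_after; infer_instance

-- ===== CLAIM (what is proved, stated in full; the proofs are below) =====
def Claim_equal_soft_break_after : Prop := ∀ (text : String) (max : Int), Dom_soft_break_after text max → Spec_soft_break_after text max (soft_break_after text max)

-- ===== LEMMAS AND PROOFS =====

theorem sbaJoinSp_nil : sbaJoinSp [] = "" := by
  apply String.toList_inj.mp
  simp [sbaJoinSp, PySem.Str.toList_join, PySem.Chars.join, List.intercalate]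

theorem sbaJoinSp_cons (w : String) (ws : List String) :
    sbaJoinSp (w :: ws) = " " ++ w ++ sbaJoinSp ws := by
  apply String.toList_inj.mp
  cases ws <;>
    simp [sbaJoinSp, PySem.Str.toList_join, PySem.Chars.join, List.intercalate]

-- proof-only helper: a direct recursive description of the output, with the
-- running length carried as a parameter
def pvBuild (max : Int) : List String → Int → String
  | [], _ => ""
  | w :: ws, run =>
      if run + (w.length : Int) > max then "\n" ++ w ++ sbaJoinSp ws
      else " " ++ w ++ pvBuild max ws (run + 1 + (w.length : Int))

theorem sbaStep_true (max : Int) (r w : String) :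
    sbaStep max (r, true) w = (r ++ (" " ++ w), true) := by
  simp [sbaStep]

theorem sbaStep_false_hi (max : Int) (r w : String)
    (h : (r.length : Int) + (w.length : Int) > max) :
    sbaStep max (r, false) w = (r ++ ("\n" ++ w), true) := by
  simp [sbaStep, h]

theorem sbaStep_false_lo (max : Int) (r w : String)
    (h : ¬ (r.length : Int) + (w.length : Int) > max) :
    sbaStep max (r, false) w = (r ++ (" " ++ w), false) := by
  simp [sbaStep, h]

theorem foldA_true (max : Int) (ws : List String) (r : String) :
    ws.foldl (sbaStep max) (r, true) = (r ++ sbaJoinSp ws, true) := by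
  induction ws generalizing r with
  | nil => simp [sbaJoinSp_nil]
  | cons w ws ih =>
      rw [List.foldl_cons, sbaStep_true, ih, sbaJoinSp_cons]
      simp [String.append_assoc]

theorem foldA_false (max : Int) (ws : List String) (r : String) :
    (ws.foldl (sbaStep max) (r, false)).1 = r ++ pvBuild max ws (r.length : Int) := by
  induction ws generalizing r with
  | nil => simp [pvBuild]
  | cons w ws ih =>
      by_cases h : (r.length : Int) + (w.length : Int) > max
      · rw [List.foldl_cons, sbaStep_false_hi max r w h, foldA_true,
          pvBuild, if_pos h]
        simp [String.append_assoc]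
      · rw [List.foldl_cons, sbaStep_false_lo max r w h, ih, pvBuild, if_neg h]
        have h1 : String.length " " = 1 := rfl
        have hlen : (((r ++ (" " ++ w)).length : ℕ) : Int)
            = (r.length : Int) + 1 + (w.length : Int) := by
          simp [String.length_append, h1]
          ring
        rw [hlen]
        simp [String.append_assoc]

theorem pvBuild_eq (max : Int) (ws : List String) (run : Int) :
    pvBuild max ws run =
      (match List.drop (sbaPrefixLen max ws run) ws with
       | [] => sbaJoinSp (List.take (sbaPrefixLen max ws run) ws)
       | w :: rest =>
          sbaJoinSp (List.take (sbaPrefixLen max ws run) ws) ++ "\n" ++ w ++ sbaJoinSp rest) := by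
  induction ws generalizing run with
  | nil => simp [pvBuild, sbaPrefixLen, sbaJoinSp_nil]
  | cons w ws ih =>
      by_cases h : run + (w.length : Int) > max
      · rw [pvBuild, if_pos h, sbaPrefixLen, if_pos h]
        simp [sbaJoinSp_nil, String.empty_append, String.append_assoc]
      · rw [pvBuild, if_neg h, sbaPrefixLen, if_neg h, ih]
        simp only [List.take_succ_cons, List.drop_succ_cons, sbaJoinSp_cons]
        cases List.drop (sbaPrefixLen max ws (run + 1 + (w.length : Int))) ws with
        | nil => simp
        | cons x rest => simp [String.append_assoc]

-- ===== VERDICT (by name: the statement is the Claim_ definition above) =====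
theorem soft_break_after_spec : Claim_equal_soft_break_after := by
  intro text max _
  unfold Spec_soft_break_after soft_break_after soft_break_after_alt
  cases h : PySem.Str.split? text " " with
  | none => rfl
  | some words =>
      simp only []
      rw [foldA_false, pvBuild_eq]
      simp [String.empty_append]
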